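-- pv_equiv track=rewrite | github.com/MularX/sentinel_control | sentinel_control/top_path_planer_single.py | _simplify_to_corners
-- ===== SOURCE A (Python) =====
-- def _simplify_to_corners(path_cells):
--     if len(path_cells) <= 2: return path_cells[:]
--     out = [path_cells[0]]
--     prev, curr = path_cells[0], path_cells[1]
--     def nrm(d): dx,dy=d; return (0 if dx==0 else int(dx/abs(dx)), 0 if dy==0 else int(dy/abs(dy)))
--     prev_dir = (curr[0]-prev[0], curr[1]-prev[1])
--     for i in range(2, len(path_cells)):
--         nxt = path_cells[i]
--         cur_dir = (nxt[0]-curr[0], nxt[1]-curr[1])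
--         if nrm(cur_dir) != nrm(prev_dir): out.append(curr)
--         prev, curr, prev_dir = curr, nxt, cur_dir
--     out.append(path_cells[-1]); return out
-- ===== SOURCE B (Python) =====
-- def _simplify_to_corners(path_cells):
--     if len(path_cells) <= 2:
--         return path_cells[:]
--     def nrm(d):
--         dx, dy = d
--         return (0 if dx == 0 else int(dx/abs(dx)), 0 if dy == 0 else int(dy/abs(dy)))
--     def step(a, b):
--         return nrm((b[0]-a[0], b[1]-a[1]))
--     def rec(cells):
--         # peel the maximal straight run at the front, then recurse from its last cell
--         d = step(cells[0], cells[1])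
--         curr, rest = cells[1], cells[2:]
--         while rest and step(curr, rest[0]) == d:
--             curr, rest = rest[0], rest[1:]
--         if not rest:
--             return [cells[0], curr]
--         return [cells[0]] + rec([curr] + rest)
--     return rec(path_cells)
-- ===== Notes on version B (the rewrite author's own statement) =====
-- stated objective: alternative
-- what changed: Replaces A's single stateful scan (carrying prev/curr/prev_dir and testing every adjacent direction pair) by a recursive decomposition: peel the maximal straight run at the front of the path, emit its start, and recurse from the run's last cell, emitting both endpoints of the final run.
import Mathlib
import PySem

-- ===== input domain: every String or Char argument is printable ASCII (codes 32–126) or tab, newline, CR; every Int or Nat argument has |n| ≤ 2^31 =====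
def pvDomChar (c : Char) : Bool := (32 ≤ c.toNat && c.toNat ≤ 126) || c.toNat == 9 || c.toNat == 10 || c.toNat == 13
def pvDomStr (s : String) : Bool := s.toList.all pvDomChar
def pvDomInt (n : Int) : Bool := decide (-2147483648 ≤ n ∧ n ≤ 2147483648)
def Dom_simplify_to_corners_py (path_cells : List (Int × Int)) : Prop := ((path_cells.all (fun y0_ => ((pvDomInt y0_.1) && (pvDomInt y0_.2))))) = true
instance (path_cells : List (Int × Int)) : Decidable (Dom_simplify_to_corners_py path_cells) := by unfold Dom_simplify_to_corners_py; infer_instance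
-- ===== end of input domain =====

-- B replaces A's single stateful corner-collecting scan by recursive peeling of maximal straight runs; same result, different decomposition.

-- ===== PORT A =====
-- nrm: (0 if dx==0 else int(dx/abs(dx)), …) — the sign of each component (exact: dx/abs(dx) is exactly ±1.0 for a nonzero int)
def pvNrm (d : Int × Int) : Int × Int :=
  ((if d.1 = 0 then 0 else if d.1 > 0 then 1 else -1),
   (if d.2 = 0 then 0 else if d.2 > 0 then 1 else -1))

-- the 'for i in range(2, len(path_cells))' loop, as structural recursion over the remaining cells,
-- carrying (curr, prev_dir, out) exactly as A does
def pvLoopA : List (Int × Int) → (Int × Int) → (Int × Int) → List (Int × Int) → List (Int × Int)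
  | [], _, _, out => out
  | nxt :: rest, curr, prev_dir, out =>
      let cur_dir : Int × Int := (nxt.1 - curr.1, nxt.2 - curr.2)
      pvLoopA rest nxt cur_dir (if pvNrm cur_dir ≠ pvNrm prev_dir then out ++ [curr] else out)

def simplify_to_corners_py (path_cells : List (Int × Int)) : List (Int × Int) :=
  if path_cells.length ≤ 2 then path_cells
  else
    match path_cells with
    | p0 :: p1 :: rest =>
        pvLoopA rest p1 (p1.1 - p0.1, p1.2 - p0.2) [p0] ++ [path_cells.getLastD (0, 0)]
    | _ => path_cells

-- ===== PORT B =====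
-- step(a, b) = nrm(b - a): the sign-normalized direction of one step
def pvStep (a b : Int × Int) : Int × Int := pvNrm (b.1 - a.1, b.2 - a.2)

-- B's 'while rest and step(curr, rest[0]) == d' loop: advance curr along the straight run,
-- returning the run's last cell and the untouched remainder
def pvSkip (d : Int × Int) : (Int × Int) → List (Int × Int) → (Int × Int) × List (Int × Int)
  | curr, [] => (curr, [])
  | curr, n :: rest => if pvStep curr n = d then pvSkip d n rest else (curr, n :: rest)

theorem pvSkip_len (d : Int × Int) : ∀ (curr : Int × Int) (rest : List (Int × Int)),
    ((pvSkip d curr rest).2).length ≤ rest.length := by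
  intro curr rest
  induction rest generalizing curr with
  | nil => simp [pvSkip]
  | cons n rest ih =>
      simp only [pvSkip]
      split
      · exact Nat.le_trans (ih n) (Nat.le_succ _)
      · simp

-- B's rec: peel the maximal straight run at the front and recurse from its last cell.
-- (rec is only called with ≥ 2 cells; the [] / [c] cases are unreachable.)
def pvRec : List (Int × Int) → List (Int × Int)
  | [] => []
  | [c] => [c]
  | c0 :: c1 :: rest =>
      match h : pvSkip (pvStep c0 c1) c1 rest with
      | (ck, []) => [c0, ck]
      | (ck, n :: r') => c0 :: pvRec (ck :: n :: r')
  termination_by cells => cells.length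
  decreasing_by
    have hl := pvSkip_len (pvStep c0 c1) c1 rest
    rw [h] at hl
    simp at hl ⊢
    omega

def simplify_to_corners_py_alt (path_cells : List (Int × Int)) : List (Int × Int) :=
  if path_cells.length ≤ 2 then path_cells else pvRec path_cells

-- ===== PRECONDITION & SPEC =====
def Spec_simplify_to_corners_py (path_cells : List (Int × Int)) (out : List (Int × Int)) : Prop := out = simplify_to_corners_py_alt path_cells
instance (path_cells : List (Int × Int)) (out : List (Int × Int)) : Decidable (Spec_simplify_to_corners_py path_cells out) := by unfold Spec_simplify_to_corners_py; infer_instance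

-- ===== CLAIM (what is proved, stated in full; the proofs are below) =====
def Claim_equal_simplify_to_corners_py : Prop := ∀ (path_cells : List (Int × Int)), Dom_simplify_to_corners_py path_cells → Spec_simplify_to_corners_py path_cells (simplify_to_corners_py path_cells)

-- ===== LEMMAS AND PROOFS =====

-- the common kernel: corners along curr::rest, given the normalized incoming direction nd
def pvCore : List (Int × Int) → (Int × Int) → (Int × Int) → List (Int × Int)
  | [], _, _ => []
  | nxt :: rest, curr, nd =>
      let cd := pvStep curr nxt
      (if cd ≠ nd then [curr] else []) ++ pvCore rest nxt cd

theorem pvLoopA_core (rest : List (Int × Int)) :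
    ∀ (curr pd : Int × Int) (out : List (Int × Int)),
    pvLoopA rest curr pd out = out ++ pvCore rest curr (pvNrm pd) := by
  induction rest with
  | nil => intro curr pd out; simp [pvLoopA, pvCore]
  | cons nxt rest ih =>
      intro curr pd out
      simp only [pvLoopA, pvCore, ih, pvStep]
      split_ifs <;> simp

-- pvSkip consumes exactly the steps whose direction equals d, which contribute no corner
theorem pvSkip_core (d : Int × Int) : ∀ (curr : Int × Int) (rest : List (Int × Int)),
    pvCore rest curr d = pvCore (pvSkip d curr rest).2 (pvSkip d curr rest).1 d := by
  intro curr rest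
  induction rest generalizing curr with
  | nil => simp [pvSkip]
  | cons n rest ih =>
      by_cases h : pvStep curr n = d
      · simp only [pvCore, pvSkip, h]
        rw [if_neg (by simp)]
        simpa using ih n
      · simp [pvCore, pvSkip, h]

theorem pvSkip_last (d : Int × Int) : ∀ (curr : Int × Int) (rest : List (Int × Int)),
    rest.getLastD curr = (pvSkip d curr rest).2.getLastD (pvSkip d curr rest).1 := by
  intro curr rest
  induction rest generalizing curr with
  | nil => simp [pvSkip]
  | cons n rest ih =>
      by_cases h : pvStep curr n = d
      · rw [List.getLastD_cons]
        simpa [pvSkip, h] using ih n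
      · simp [pvSkip, h]

theorem pvSkip_head (d : Int × Int) : ∀ (curr : Int × Int) (rest : List (Int × Int))
    (ck n : Int × Int) (r' : List (Int × Int)),
    pvSkip d curr rest = (ck, n :: r') → pvStep ck n ≠ d := by
  intro curr rest
  induction rest generalizing curr with
  | nil => intro ck n r' h; simp [pvSkip] at h
  | cons m rest ih =>
      intro ck n r' h
      by_cases hm : pvStep curr m = d
      · rw [pvSkip, if_pos hm] at h
        exact ih m ck n r' h
      · rw [pvSkip, if_neg hm] at h
        obtain ⟨h1, h2⟩ := Prod.mk.injEq .. ▸ h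
        obtain ⟨h3, h4⟩ := List.cons.injEq .. ▸ h2
        subst h1; subst h3
        exact hm

-- main lemma: B's recursion computes first cell + corners + last cell of the (≥2-cell) path
theorem pvRec_core : ∀ (k : Nat) (rest : List (Int × Int)), rest.length ≤ k →
    ∀ (c0 c1 : Int × Int),
    pvRec (c0 :: c1 :: rest) = c0 :: (pvCore rest c1 (pvStep c0 c1) ++ [rest.getLastD c1]) := by
  intro k
  induction k with
  | zero =>
      intro rest hk c0 c1
      have : rest = [] := List.length_eq_zero_iff.mp (Nat.le_zero.mp hk)
      subst this
      simp [pvRec, pvSkip, pvCore]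
  | succ k ih =>
      intro rest hk c0 c1
      rw [pvRec]
      rcases hs : pvSkip (pvStep c0 c1) c1 rest with ⟨ck, rest'⟩
      rcases rest' with _ | ⟨n, r'⟩
      · -- the whole path is one straight run
        have hcore := pvSkip_core (pvStep c0 c1) c1 rest
        have hlast := pvSkip_last (pvStep c0 c1) c1 rest
        rw [hs] at hcore hlast
        dsimp only at hcore hlast ⊢
        simp only [pvCore] at hcore
        rw [List.getLastD_nil] at hlast
        rw [hcore, hlast]
        simp
      · -- corner at ck, recurse
        have hcore := pvSkip_core (pvStep c0 c1) c1 rest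
        have hlast := pvSkip_last (pvStep c0 c1) c1 rest
        have hhead := pvSkip_head (pvStep c0 c1) c1 rest ck n r' hs
        rw [hs] at hcore hlast
        dsimp only at hcore hlast ⊢
        have hlen : (n :: r').length ≤ rest.length := by
          have := pvSkip_len (pvStep c0 c1) c1 rest
          rw [hs] at this; exact this
        have hrec := ih r' (by simp at hlen; omega) ck n
        rw [hrec, hcore]
        simp only [pvCore]
        rw [if_pos hhead, hlast, List.getLastD_cons]
        simp

-- ===== VERDICT (by name: the statement is the Claim_ definition above) =====
theorem simplify_to_corners_py_spec : Claim_equal_simplify_to_corners_py := by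
  unfold Claim_equal_simplify_to_corners_py
  intro path_cells _
  unfold Spec_simplify_to_corners_py simplify_to_corners_py simplify_to_corners_py_alt
  by_cases h : path_cells.length ≤ 2
  · simp [h]
  · simp only [h, if_false]
    rcases path_cells with _ | ⟨p0, _ | ⟨p1, rest⟩⟩
    · simp at h
    · simp at h
    · show pvLoopA rest p1 (p1.1 - p0.1, p1.2 - p0.2) [p0] ++ [(p0 :: p1 :: rest).getLastD (0, 0)]
        = pvRec (p0 :: p1 :: rest)
      rw [pvLoopA_core, pvRec_core rest.length rest le_rfl p0 p1]
      rcases rest with _ | ⟨r0, rs⟩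
      · simp at h
      · simp only [pvStep, List.cons_append,
          List.nil_append, List.getLastD_eq_getLast?]
        cases hg : (r0 :: rs).getLast? with
        | none => simp at hg
        | some x => simp [hg]
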